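-- pv_equiv track=rewrite | github.com/imoghul/Salah-Reader | reader.py | identifyDay
-- ===== SOURCE A (Python) =====
-- def identifyDay(day):
--     monday = "monday"
--     tuesday = "tuesday"
--     wednesday = "wednesday"
--     thursday = "thursday"
--     friday = "friday"
--     saturday = "saturday"
--     sunday = "sunday"
--     if day.lower() in [monday[0 : i + 1] for i in range(len(monday))] + [
--         monday[0 : i + 1] + "." for i in range(len(monday))
--     ]:
--         return 0
--     if day.lower() in [tuesday[0 : i + 1] for i in range(len(tuesday))] + [
--         tuesday[0 : i + 1] + "." for i in range(len(tuesday))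
--     ]:
--         return 1
--     if day.lower() in [wednesday[0 : i + 1] for i in range(len(wednesday))] + [
--         wednesday[0 : i + 1] + "." for i in range(len(wednesday))
--     ]:
--         return 2
--     if day.lower() in [thursday[0 : i + 1] for i in range(len(thursday))] + [
--         thursday[0 : i + 1] + "." for i in range(len(thursday))
--     ]:
--         return 3
--     if day.lower() in [friday[0 : i + 1] for i in range(len(friday))] + [
--         friday[0 : i + 1] + "." for i in range(len(friday))
--     ]:
--         return 4
--     if day.lower() in [saturday[0 : i + 1] for i in range(len(saturday))] + [
--         saturday[0 : i + 1] + "." for i in range(len(saturday))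
--     ]:
--         return 5
--     if day.lower() in [sunday[0 : i + 1] for i in range(len(sunday))] + [
--         sunday[0 : i + 1] + "." for i in range(len(sunday))
--     ]:
--         return 6
-- ===== SOURCE B (Python) =====
-- def identifyDay(day):
--     d = day.lower()
--     if d.endswith("."):
--         d = d[:-1]
--     if not d:
--         return None
--     for i, name in enumerate(["monday", "tuesday", "wednesday", "thursday", "friday", "saturday", "sunday"]):
--         if name.startswith(d):
--             return i
--     return None
-- ===== Notes on version B (the rewrite author's own statement) =====
-- stated objective: simpler
-- what changed: Replaces the seven unrolled membership tests against explicitly built lists of all prefixes and dotted prefixes by normalising the input once (lowercase, strip one trailing dot, reject empty) and scanning the seven day names with startswith.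
import Mathlib
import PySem

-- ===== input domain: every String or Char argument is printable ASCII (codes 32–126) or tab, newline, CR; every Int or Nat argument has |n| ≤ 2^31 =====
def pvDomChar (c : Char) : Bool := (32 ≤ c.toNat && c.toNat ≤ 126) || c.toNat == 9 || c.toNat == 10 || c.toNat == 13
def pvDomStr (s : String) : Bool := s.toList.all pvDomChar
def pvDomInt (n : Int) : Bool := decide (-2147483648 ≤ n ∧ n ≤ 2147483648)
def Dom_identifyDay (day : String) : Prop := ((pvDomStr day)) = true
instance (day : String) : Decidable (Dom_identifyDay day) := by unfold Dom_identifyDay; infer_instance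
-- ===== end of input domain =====

-- B is simpler: it normalises the input once (lowercase, strip one trailing dot, reject empty)
-- and scans the seven day names with startswith, instead of A's seven unrolled membership tests
-- against explicitly built prefix/dotted-prefix lists.

-- ===== PORT A =====
-- [name[0:i+1] for i in range(len(name))] + [name[0:i+1] + "." for i in range(len(name))]
def pvPrefixes (name : List Char) : List (List Char) :=
  (PySem.List.pyRange 0 (name.length : Int) 1).map
    (fun i => PySem.List.slice name (some 0) (some (i + 1)))

def pvPrefLists (name : List Char) : List (List Char) :=
  pvPrefixes name ++ (pvPrefixes name).map (fun p => p ++ ['.'])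

def identifyDay (day : String) : Option Int :=
  let dl := PySem.Chars.lower day.toList
  if dl ∈ pvPrefLists "monday".toList then some 0
  else if dl ∈ pvPrefLists "tuesday".toList then some 1
  else if dl ∈ pvPrefLists "wednesday".toList then some 2
  else if dl ∈ pvPrefLists "thursday".toList then some 3
  else if dl ∈ pvPrefLists "friday".toList then some 4
  else if dl ∈ pvPrefLists "saturday".toList then some 5
  else if dl ∈ pvPrefLists "sunday".toList then some 6
  else none

-- ===== PORT B =====
-- if d.endswith("."): d = d[:-1]
def pvStripDot (d : List Char) : List Char :=
  if PySem.Chars.endswith d ['.'] then PySem.Chars.slice d none (some (-1)) else d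

-- for i, name in enumerate(names): if name.startswith(d): return i
def pvScanNames (d : List Char) : List (List Char) → Int → Option Int
  | [], _ => none
  | n :: ns, i => if PySem.Chars.startswith n d then some i else pvScanNames d ns (i + 1)

def identifyDay_alt (day : String) : Option Int :=
  let d := pvStripDot (PySem.Chars.lower day.toList)
  if d = [] then none
  else
    pvScanNames d
      ["monday".toList, "tuesday".toList, "wednesday".toList, "thursday".toList,
       "friday".toList, "saturday".toList, "sunday".toList] 0

-- ===== PRECONDITION & SPEC =====
def Spec_identifyDay (day : String) (out : Option Int) : Prop := out = identifyDay_alt day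
instance (day : String) (out : Option Int) : Decidable (Spec_identifyDay day out) := by unfold Spec_identifyDay; infer_instance

-- ===== CLAIM (what is proved, stated in full; the proofs are below) =====
def Claim_equal_identifyDay : Prop := ∀ (day : String), Dom_identifyDay day → Spec_identifyDay day (identifyDay day)

-- ===== LEMMAS AND PROOFS =====

-- the nonempty prefixes of `name` are exactly the members of A's first comprehension list
lemma mem_pvPrefixes_iff (name L : List Char) :
    L ∈ pvPrefixes name ↔ (L ≠ [] ∧ L <+: name) := by
  unfold pvPrefixes
  rw [List.mem_map]
  constructor
  · rintro ⟨i, hi, rfl⟩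
    rw [PySem.List.mem_pyRange_one] at hi
    obtain ⟨h0, h1⟩ := hi
    lift i to ℕ using h0 with j
    have hj : j < name.length := by exact_mod_cast h1
    have hcast : ((j : Int) + 1) = ((j + 1 : Nat) : Int) := by push_cast; ring
    rw [hcast, PySem.List.slice_zero_start, PySem.List.slice_to_natCast]
    refine ⟨?_, List.take_prefix _ _⟩
    intro hnil
    rcases List.take_eq_nil_iff.mp hnil with h' | h'
    · omega
    · rw [h'] at hj; simp at hj
  · rintro ⟨hne, hpre⟩
    have hlen : 1 ≤ L.length := by
      cases L with
      | nil => exact absurd rfl hne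
      | cons a t => simp
    have hle : L.length ≤ name.length := hpre.length_le
    refine ⟨((L.length - 1 : Nat) : Int), ?_, ?_⟩
    · rw [PySem.List.mem_pyRange_one]
      exact ⟨by positivity, by exact_mod_cast (by omega : L.length - 1 < name.length)⟩
    · have hcast : ((L.length - 1 : Nat) : Int) + 1 = ((L.length : Nat) : Int) := by
        omega
      rw [hcast, PySem.List.slice_zero_start, PySem.List.slice_to_natCast]
      exact (List.prefix_iff_eq_take.mp hpre).symm

-- membership in A's combined list, rephrased through B's normalisation
lemma mem_pvPrefLists_iff (name L : List Char) (h : '.' ∉ name) :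
    L ∈ pvPrefLists name ↔ (pvStripDot L ≠ [] ∧ pvStripDot L <+: name) := by
  unfold pvPrefLists pvStripDot
  rw [List.mem_append, List.mem_map]
  by_cases he : PySem.Chars.endswith L ['.'] = true
  · obtain ⟨M, rfl⟩ := (PySem.Chars.endswith_iff L ['.']).mp he
    rw [if_pos he]
    simp only [PySem.Chars.slice_eq_listSlice, PySem.List.slice_to_neg_one,
      List.dropLast_concat]
    constructor
    · rintro (hp | ⟨p, hp, heq⟩)
      · exact absurd (((mem_pvPrefixes_iff _ _).mp hp).2.subset (by simp)) h
      · have hMp : M = p := List.append_cancel_right heq.symm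
        subst hMp
        exact (mem_pvPrefixes_iff _ _).mp hp
    · intro hM
      exact Or.inr ⟨M, (mem_pvPrefixes_iff _ _).mpr hM, rfl⟩
  · rw [if_neg he]
    rw [mem_pvPrefixes_iff]
    constructor
    · rintro (hp | ⟨p, hp, rfl⟩)
      · exact hp
      · exact absurd ((PySem.Chars.endswith_iff _ ['.']).mpr ⟨p, rfl⟩) he
    · exact Or.inl

-- ===== VERDICT (by name: the statement is the Claim_ definition above) =====
theorem identifyDay_spec : Claim_equal_identifyDay := by
  intro day _
  unfold Spec_identifyDay identifyDay identifyDay_alt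
  set L := PySem.Chars.lower day.toList with hL
  set d := pvStripDot L with hd
  by_cases hde : d = []
  · have hfalse : ∀ name : List Char, '.' ∉ name → ((L ∈ pvPrefLists name) = False) := by
      intro name hn
      simp only [eq_iff_iff, iff_false]
      intro hmem
      exact ((mem_pvPrefLists_iff name L hn).mp hmem).1 (hd ▸ hde)
    rw [if_pos hde]
    simp only [hfalse "monday".toList (by decide), hfalse "tuesday".toList (by decide),
      hfalse "wednesday".toList (by decide), hfalse "thursday".toList (by decide),
      hfalse "friday".toList (by decide), hfalse "saturday".toList (by decide),
      hfalse "sunday".toList (by decide), if_false]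
  · have hiff : ∀ name : List Char, '.' ∉ name →
        ((L ∈ pvPrefLists name) = (PySem.Chars.startswith name d = true)) := by
      intro name hn
      simp only [eq_iff_iff]
      rw [mem_pvPrefLists_iff name L hn, ← hd, PySem.Chars.startswith_iff]
      exact ⟨fun h => h.2, fun h => ⟨hde, h⟩⟩
    rw [if_neg hde]
    simp only [hiff "monday".toList (by decide), hiff "tuesday".toList (by decide),
      hiff "wednesday".toList (by decide), hiff "thursday".toList (by decide),
      hiff "friday".toList (by decide), hiff "saturday".toList (by decide),
      hiff "sunday".toList (by decide), pvScanNames]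
    norm_num
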